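-- pv_equiv track=rewrite | github.com/emdb-empiar/3dstrudel | threed_strudel/utils/functions.py | find_good_grid
-- ===== SOURCE A (Python) =====
-- def find_good_grid(in_grid):
--     def largest_prime_factor(n):
--         i = 2
--         while i * i <= n:
--             if n % i:
--                 i += 1
--             else:
--                 n //= i
--         return n
--
--     out_grid = []
--     for dimension in in_grid:
--         new_dimension = dimension
--         if new_dimension % 2:
--             new_dimension += 1
--         largest_prime = largest_prime_factor(new_dimension)
--         while largest_prime > 19:
--             new_dimension += 2
--             largest_prime = largest_prime_factor(new_dimension)
--         out_grid.append(new_dimension)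
--     return tuple(out_grid)
-- ===== SOURCE B (Python) =====
-- def find_good_grid(in_grid):
--     primes = (2, 3, 5, 7, 11, 13, 17, 19)
--
--     def is_smooth(n):
--         if n < 2:
--             return True
--         for p in primes:
--             while n % p == 0:
--                 n //= p
--         return n == 1
--
--     out_grid = []
--     for dimension in in_grid:
--         n = dimension + dimension % 2
--         while not is_smooth(n):
--             n += 2
--         out_grid.append(n)
--     return tuple(out_grid)
-- ===== Notes on version B (the rewrite author's own statement) =====
-- stated objective: faster
-- what changed: Replaces per-candidate trial division up to sqrt(n) (computing the largest prime factor) with a 19-smoothness test that divides out the eight fixed primes 2..19 and checks the quotient is 1.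
import Mathlib
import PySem

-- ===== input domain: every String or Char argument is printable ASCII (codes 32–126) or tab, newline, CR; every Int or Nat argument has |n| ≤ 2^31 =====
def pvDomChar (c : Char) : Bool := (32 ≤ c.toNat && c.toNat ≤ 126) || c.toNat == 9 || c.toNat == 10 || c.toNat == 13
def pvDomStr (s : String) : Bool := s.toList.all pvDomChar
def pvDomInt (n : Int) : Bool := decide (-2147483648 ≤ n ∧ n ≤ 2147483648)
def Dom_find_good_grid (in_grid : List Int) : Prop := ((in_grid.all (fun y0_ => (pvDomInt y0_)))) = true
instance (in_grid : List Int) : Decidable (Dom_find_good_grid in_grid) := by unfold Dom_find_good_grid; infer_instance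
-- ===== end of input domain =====

-- B replaces A's per-candidate trial division up to √n (largest prime factor) by dividing out the
-- eight fixed primes 2..19 and checking the quotient is 1; same return value for every input.
-- The while-loops are ported with a fuel counter (4294967296 outer steps) purely as a totality
-- guard; within the 32-bit domain the loops stop long before the fuel runs out.

-- ===== PORT A =====
-- inner while of largest_prime_factor: i=2; while i*i<=n: if n%i: i+=1 else: n//=i; return n
def lpfGoA : Nat → Int → Int → Int
  | 0, _, n => n
  | f+1, i, n =>
    if i * i ≤ n then
      (if PySem.Int.mod n i ≠ 0 then lpfGoA f (i+1) n else lpfGoA f i (PySem.Int.floordiv n i))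
    else n

def largest_prime_factor (n : Int) : Int := lpfGoA (n.toNat + 2) 2 n

-- while largest_prime > 19: new_dimension += 2; largest_prime = largest_prime_factor(new_dimension)
def gridLoopA : Nat → Int → Int → Int
  | 0, nd, _ => nd
  | f+1, nd, lp =>
    if lp > 19 then gridLoopA f (nd + 2) (largest_prime_factor (nd + 2)) else nd

def find_good_grid (in_grid : List Int) : List Int :=
  in_grid.foldl
    (fun out_grid dimension =>
      let nd := if PySem.Int.mod dimension 2 ≠ 0 then dimension + 1 else dimension
      out_grid ++ [gridLoopA 4294967296 nd (largest_prime_factor nd)])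
    []

-- ===== PORT B =====
-- inner while of is_smooth: while n % p == 0: n //= p
def divOutB : Nat → Int → Int → Int
  | 0, _, n => n
  | f+1, p, n =>
    if PySem.Int.mod n p = 0 then divOutB f p (PySem.Int.floordiv n p) else n

def is_smooth (n : Int) : Bool :=
  if n < 2 then true
  else (([2, 3, 5, 7, 11, 13, 17, 19] : List Int).foldl (fun m p => divOutB m.toNat p m) n) == 1

-- while not is_smooth(n): n += 2
def gridLoopB : Nat → Int → Int
  | 0, n => n
  | f+1, n => if is_smooth n then n else gridLoopB f (n + 2)

def find_good_grid_alt (in_grid : List Int) : List Int :=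
  in_grid.foldl
    (fun out_grid dimension =>
      out_grid ++ [gridLoopB 4294967296 (dimension + PySem.Int.mod dimension 2)])
    []

-- ===== PRECONDITION & SPEC =====
def Spec_find_good_grid (in_grid : List Int) (out : List Int) : Prop := out = find_good_grid_alt in_grid
instance (in_grid : List Int) (out : List Int) : Decidable (Spec_find_good_grid in_grid out) := by unfold Spec_find_good_grid; infer_instance

-- ===== CLAIM (what is proved, stated in full; the proofs are below) =====
def Claim_equal_find_good_grid : Prop := ∀ (in_grid : List Int), Dom_find_good_grid in_grid → Spec_find_good_grid in_grid (find_good_grid in_grid)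

-- ===== LEMMAS AND PROOFS =====

-- Nat shadows of the two inner loops
def lpfGoN : Nat → Nat → Nat → Nat
  | 0, _, n => n
  | f+1, i, n =>
    if i * i ≤ n then (if n % i = 0 then lpfGoN f i (n / i) else lpfGoN f (i+1) n) else n

def divOutN : Nat → Nat → Nat → Nat
  | 0, _, n => n
  | f+1, p, n => if n % p = 0 then divOutN f p (n / p) else n

lemma lpf_bridge : ∀ (f i n : Nat), lpfGoA f (↑i) (↑n) = ↑(lpfGoN f i n) := by
  intro f
  induction f with
  | zero => intro i n; rfl
  | succ f ih =>
    intro i n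
    simp only [lpfGoA, lpfGoN, PySem.Int.mod_natCast, PySem.Int.floordiv_natCast,
      ← Nat.cast_mul, Nat.cast_le, ne_eq, Nat.cast_eq_zero]
    by_cases hg : i * i ≤ n
    · by_cases hm : n % i = 0
      · simp [hg, hm]
        exact_mod_cast ih i (n / i)
      · simp [hg, hm]
        exact_mod_cast ih (i + 1) n
    · simp [hg]

lemma divOut_bridge : ∀ (f p n : Nat), divOutB f (↑p) (↑n) = ↑(divOutN f p n) := by
  intro f
  induction f with
  | zero => intro p n; rfl
  | succ f ih =>
    intro p n
    simp only [divOutB, divOutN, PySem.Int.mod_natCast, PySem.Int.floordiv_natCast,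
      Nat.cast_eq_zero]
    by_cases hm : n % p = 0
    · simp [hm]
      exact_mod_cast ih p (n / p)
    · simp [hm]

lemma fold_bridge : ∀ (ps : List Nat) (m : Nat),
    (ps.map (fun p => Int.ofNat p)).foldl (fun a p => divOutB a.toNat p a) (↑m)
      = ↑(ps.foldl (fun a p => divOutN a p a) m) := by
  intro ps
  induction ps with
  | nil => intro m; rfl
  | cons p ps ih =>
    intro m
    rw [List.map_cons, List.foldl_cons, List.foldl_cons, Int.toNat_natCast]
    rw [show Int.ofNat p = ((p : Nat) : Int) from rfl, divOut_bridge]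
    exact ih (divOutN m p m)

-- A's inner loop computes the largest prime factor
lemma lpfGoN_spec : ∀ (f i n : Nat), 2 ≤ i → 2 ≤ n →
    (∀ q, q.Prime → q ∣ n → i ≤ q) → n + 1 ≤ f + i →
    (lpfGoN f i n).Prime ∧ lpfGoN f i n ∣ n ∧ ∀ q, q.Prime → q ∣ n → q ≤ lpfGoN f i n := by
  intro f
  induction f with
  | zero =>
    intro i n _ hn hinv hfuel
    exfalso
    have hp := Nat.minFac_prime (by omega : n ≠ 1)
    have := hinv _ hp (Nat.minFac_dvd n)
    have := Nat.minFac_le (by omega : 0 < n)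
    omega
  | succ f ih =>
    intro i n hi hn hinv hfuel
    simp only [lpfGoN]
    by_cases hg : i * i ≤ n
    · by_cases hm : n % i = 0
      · simp only [hg, hm, if_pos]
        have hdvd : i ∣ n := Nat.dvd_of_mod_eq_zero hm
        have hiprime : i.Prime := by
          rw [Nat.prime_def_minFac]
          refine ⟨hi, le_antisymm (Nat.minFac_le (by omega)) ?_⟩
          exact hinv _ (Nat.minFac_prime (by omega)) ((Nat.minFac_dvd i).trans hdvd)
        have hle : i ≤ n / i := (Nat.le_div_iff_mul_le (by omega)).mpr hg
        have hdivdvd : n / i ∣ n := Nat.div_dvd_of_dvd hdvd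
        have hinv' : ∀ q, q.Prime → q ∣ n / i → i ≤ q :=
          fun q hq hqd => hinv q hq (hqd.trans hdivdvd)
        have hlt : n / i < n := Nat.div_lt_self (by omega) (by omega)
        obtain ⟨hp, hd, hmax⟩ := ih i (n / i) hi (by omega) hinv' (by omega)
        refine ⟨hp, hd.trans hdivdvd, ?_⟩
        intro q hq hqn
        have hmul : n / i * i = n := Nat.div_mul_cancel hdvd
        have : q ∣ n / i ∨ q ∣ i := (Nat.Prime.dvd_mul hq).mp (by rw [hmul]; exact hqn)
        rcases this with h | h
        · exact hmax q hq h
        · have : q = i := (Nat.prime_dvd_prime_iff_eq hq hiprime).mp h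
          subst this
          exact hinv' _ hp hd
      · simp only [hg, hm, if_false]
        have hinv' : ∀ q, q.Prime → q ∣ n → i + 1 ≤ q := by
          intro q hq hqd
          have := hinv q hq hqd
          rcases Nat.lt_or_ge i q with h | h
          · omega
          · have : q = i := by omega
            subst this
            exact absurd (Nat.mod_eq_zero_of_dvd hqd) hm
        exact ih (i + 1) n (by omega) hn hinv' (by omega)
    · simp only [hg, if_false]
      have hnp : n.Prime := by
        by_contra hnot
        have hsq := Nat.minFac_sq_le_self (by omega : 0 < n) hnot
        have hple := hinv _ (Nat.minFac_prime (by omega : n ≠ 1)) (Nat.minFac_dvd n)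
        have : i * i ≤ n.minFac * n.minFac := Nat.mul_le_mul hple hple
        have : n.minFac * n.minFac ≤ n := by nlinarith [hsq, sq (n.minFac)]
        omega
      refine ⟨hnp, dvd_refl n, ?_⟩
      intro q hq hqn
      exact le_of_eq ((Nat.prime_dvd_prime_iff_eq hq hnp).mp hqn)

-- B's inner loop removes exactly the factor p
lemma divOutN_spec : ∀ (f p n : Nat), p.Prime → 1 ≤ n → n ≤ f →
    divOutN f p n ∣ n ∧ 1 ≤ divOutN f p n ∧ ¬ p ∣ divOutN f p n ∧
      (∀ q, q.Prime → q ≠ p → (q ∣ divOutN f p n ↔ q ∣ n)) := by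
  intro f
  induction f with
  | zero => intro p n _ h1 h0; omega
  | succ f ih =>
    intro p n hp h1 hf
    simp only [divOutN]
    by_cases hm : n % p = 0
    · simp only [hm, if_pos]
      have hdvd : p ∣ n := Nat.dvd_of_mod_eq_zero hm
      have hp2 := hp.two_le
      have hple : p ≤ n := Nat.le_of_dvd (by omega) hdvd
      have h1' : 1 ≤ n / p := (Nat.le_div_iff_mul_le (by omega)).mpr (by omega)
      have hlt : n / p < n := Nat.div_lt_self (by omega) (by omega)
      obtain ⟨hd, hpos, hnd, hiff⟩ := ih p (n / p) hp h1' (by omega)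
      have hdivdvd : n / p ∣ n := Nat.div_dvd_of_dvd hdvd
      refine ⟨hd.trans hdivdvd, hpos, hnd, ?_⟩
      intro q hq hne
      rw [hiff q hq hne]
      constructor
      · intro h; exact h.trans hdivdvd
      · intro h
        have hmul : n / p * p = n := Nat.div_mul_cancel hdvd
        rcases (Nat.Prime.dvd_mul hq).mp (hmul ▸ h) with h' | h'
        · exact h'
        · exact absurd ((Nat.prime_dvd_prime_iff_eq hq hp).mp h') hne
    · simp only [hm, if_false]
      refine ⟨dvd_refl n, h1, fun h => hm (Nat.mod_eq_zero_of_dvd h), ?_⟩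
      simp

lemma reduceN_spec : ∀ (ps : List Nat) (n : Nat), (∀ p ∈ ps, p.Prime) → 1 ≤ n →
    (ps.foldl (fun a p => divOutN a p a) n) ∣ n ∧ 1 ≤ ps.foldl (fun a p => divOutN a p a) n ∧
      (∀ p ∈ ps, ¬ p ∣ ps.foldl (fun a p => divOutN a p a) n) ∧
      (∀ q, q.Prime → q ∣ n → q ∉ ps → q ∣ ps.foldl (fun a p => divOutN a p a) n) := by
  intro ps
  induction ps with
  | nil => intro n _ h1; exact ⟨dvd_refl n, h1, by simp, fun q _ hq _ => hq⟩
  | cons p ps ih =>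
    intro n hps h1
    have hp : p.Prime := hps p (List.mem_cons_self ..)
    obtain ⟨hd1, h11, hnd1, hiff1⟩ := divOutN_spec n p n hp h1 (le_refl n)
    simp only [List.foldl_cons]
    obtain ⟨hd, hpos, hnone, hrest⟩ :=
      ih (divOutN n p n) (fun q hq => hps q (List.mem_cons_of_mem _ hq)) h11
    refine ⟨hd.trans hd1, hpos, ?_, ?_⟩
    · intro p' hp'
      rcases List.mem_cons.mp hp' with rfl | hmem
      · intro hcon
        exact hnd1 (hcon.trans hd)
      · exact hnone p' hmem
    · intro q hq hqn hqmem
      have hne : q ≠ p := fun h => hqmem (h ▸ List.mem_cons_self ..)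
      have hqd1 : q ∣ divOutN n p n := (hiff1 q hq hne).mpr hqn
      exact hrest q hq hqd1 (fun h => hqmem (List.mem_cons_of_mem _ h))

lemma small_prime_mem : ∀ q : Nat, q.Prime → q ≤ 19 → q ∈ [2, 3, 5, 7, 11, 13, 17, 19] := by
  intro q hq hle
  have h2 := hq.two_le
  interval_cases q <;> revert hq <;> decide

lemma reduce_eq_one_iff (m : Nat) (h1 : 1 ≤ m) :
    ([2, 3, 5, 7, 11, 13, 17, 19] : List Nat).foldl (fun a p => divOutN a p a) m = 1 ↔
      (∀ q, q.Prime → q ∣ m → q ≤ 19) := by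
  obtain ⟨hd, hpos, hnone, hrest⟩ :=
    reduceN_spec [2, 3, 5, 7, 11, 13, 17, 19] m (by decide) h1
  set r := ([2, 3, 5, 7, 11, 13, 17, 19] : List Nat).foldl (fun a p => divOutN a p a) m with hr
  constructor
  · intro h q hq hqm
    by_cases hmem : q ∈ [2, 3, 5, 7, 11, 13, 17, 19]
    · simp only [List.mem_cons, List.not_mem_nil, or_false] at hmem
      omega
    · have := hrest q hq hqm hmem
      rw [h] at this
      exact absurd (Nat.eq_one_of_dvd_one this) hq.ne_one
  · intro hall
    by_contra hne
    have hr2 : 2 ≤ r := by omega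
    have hpm := Nat.minFac_prime (by omega : r ≠ 1)
    have hdm : r.minFac ∣ m := (Nat.minFac_dvd r).trans hd
    have hmem := small_prime_mem r.minFac hpm (hall _ hpm hdm)
    exact hnone _ hmem (Nat.minFac_dvd r)

-- the two acceptance tests agree on every Int
lemma test_iff (n : Int) : largest_prime_factor n ≤ 19 ↔ is_smooth n = true := by
  by_cases h2 : n < 2
  · have hguard : ¬ ((2 : Int) * 2 ≤ n) := by omega
    have hstep : ∀ (f : Nat) (i x : Int), ¬ (i * i ≤ x) → lpfGoA (f + 1) i x = x := by
      intro f i x h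
      simp [lpfGoA, h]
    have hA : largest_prime_factor n = n := by
      rw [largest_prime_factor, show n.toNat + 2 = (n.toNat + 1) + 1 from rfl,
        hstep _ _ _ hguard]
    rw [hA, is_smooth, if_pos h2]
    simpa using (by omega : n ≤ 19)
  · have h2 : (2 : Int) ≤ n := by omega
    obtain ⟨m, rfl⟩ : ∃ m : Nat, n = (m : Int) := ⟨n.toNat, (Int.toNat_of_nonneg (by omega)).symm⟩
    have hm2 : 2 ≤ m := by exact_mod_cast h2
    -- A side
    have hA : largest_prime_factor (m : Int) = ↑(lpfGoN (m + 2) 2 m) := by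
      have : ((m : Int)).toNat = m := Int.toNat_natCast m
      rw [largest_prime_factor, this, show ((2 : Int)) = ((2 : Nat) : Int) by rfl, lpf_bridge]
    obtain ⟨hp, hd, hmax⟩ :=
      lpfGoN_spec (m + 2) 2 m (le_refl 2) hm2 (fun q hq _ => hq.two_le) (by omega)
    -- B side
    have hlist : ([2, 3, 5, 7, 11, 13, 17, 19] : List Int)
        = ([2, 3, 5, 7, 11, 13, 17, 19] : List Nat).map (fun p => Int.ofNat p) := by decide
    have hB : is_smooth (m : Int)
        = (((([2, 3, 5, 7, 11, 13, 17, 19] : List Nat).foldl (fun a p => divOutN a p a) m : Nat) : Int) == 1) := by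
      rw [is_smooth, if_neg (by exact_mod_cast not_lt.mpr h2), hlist, fold_bridge]
    rw [hA, hB]
    have hred := reduce_eq_one_iff m (by omega)
    constructor
    · intro hle
      have : ∀ q, q.Prime → q ∣ m → q ≤ 19 := by
        intro q hq hqm
        have := hmax q hq hqm
        have hlpf : lpfGoN (m + 2) 2 m ≤ 19 := by exact_mod_cast hle
        omega
      simp [hred.mpr this]
    · intro hsm
      have h1 : ([2, 3, 5, 7, 11, 13, 17, 19] : List Nat).foldl (fun a p => divOutN a p a) m = 1 := by
        have := of_decide_eq_true hsm
        exact_mod_cast this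
      have := hred.mp h1 _ hp hd
      exact_mod_cast this

-- the two search loops run in lockstep
lemma loop_eq : ∀ (f : Nat) (n : Int), gridLoopA f n (largest_prime_factor n) = gridLoopB f n := by
  intro f
  induction f with
  | zero => intro n; rfl
  | succ f ih =>
    intro n
    simp only [gridLoopA, gridLoopB]
    by_cases hs : is_smooth n
    · rw [if_neg (by have := (test_iff n).mpr hs; omega), if_pos hs]
    · have hgt : largest_prime_factor n > 19 := by
        rcases lt_or_ge 19 (largest_prime_factor n) with h | h
        · exact h
        · exact absurd ((test_iff n).mp (by omega)) hs
      rw [if_pos hgt, if_neg hs]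
      exact ih (n + 2)

-- evening the dimension: A's branch equals B's arithmetic form
lemma even_eq (d : Int) :
    (if PySem.Int.mod d 2 ≠ 0 then d + 1 else d) = d + PySem.Int.mod d 2 := by
  have h0 := PySem.Int.mod_nonneg d (by norm_num : (0 : Int) < 2)
  have h1 := PySem.Int.mod_lt d (by norm_num : (0 : Int) < 2)
  by_cases h : PySem.Int.mod d 2 = 0 <;> simp [h] <;> omega

lemma foldl_eq : ∀ (l : List Int) (acc : List Int),
    l.foldl (fun out_grid dimension =>
      let nd := if PySem.Int.mod dimension 2 ≠ 0 then dimension + 1 else dimension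
      out_grid ++ [gridLoopA 4294967296 nd (largest_prime_factor nd)]) acc
    = l.foldl (fun out_grid dimension =>
      out_grid ++ [gridLoopB 4294967296 (dimension + PySem.Int.mod dimension 2)]) acc := by
  intro l
  induction l with
  | nil => intro acc; rfl
  | cons d l ih =>
    intro acc
    simp only [List.foldl_cons]
    rw [show (let nd := if PySem.Int.mod d 2 ≠ 0 then d + 1 else d
        gridLoopA 4294967296 nd (largest_prime_factor nd))
        = gridLoopB 4294967296 (d + PySem.Int.mod d 2) by
      simp only [even_eq d, loop_eq]]
    exact ih _

-- ===== VERDICT (by name: the statement is the Claim_ definition above) =====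
theorem find_good_grid_spec : Claim_equal_find_good_grid := by
  intro in_grid _
  unfold Spec_find_good_grid find_good_grid find_good_grid_alt
  exact foldl_eq in_grid []
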